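-- pv_equiv track=rewrite | github.com/brunobell/aoc-2019 | python3/aoc-01-04/main.py | is_password_part_1
-- ===== SOURCE A (Python) =====
-- import typing
--
-- def get_repeat_info(n: int) -> (bool, typing.Dict):
--     digit, is_asc, repeat, hashmap = '0', True, 0, dict()
--     for c in str(n):
--         if c in hashmap:
--             hashmap[c] = hashmap[c] + 1
--         else:
--             hashmap[c] = 1
--
--         if digit <= c:
--             if digit == c:
--                 digit, is_asc, repeat = c, is_asc, repeat + 1
--             else:
--                 digit, is_asc, repeat = c, is_asc, 1
--         else:
--             digit, is_asc, repeat = c, False, 1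
--     return is_asc, hashmap
--
-- def is_password_part_1(n: int, min_: int, max_: int) -> bool:
--     is_asc, hashmap = get_repeat_info(n)
--     min_repeat = min([x for x in hashmap.values() if x > 1] or [1])
--     max_repeat = hashmap[max(hashmap.keys())]
--     if is_asc and max_repeat <= max_ and min_repeat >= min_:
--         return True
--     else:
--         return False
-- ===== SOURCE B (Python) =====
-- def is_password_part_1(n: int, min_: int, max_: int) -> bool:
--     s = str(n)
--     if n < 0 or sorted(s) != list(s):
--         return False
--     # digits are non-decreasing: run-length encode the (consecutive) digit groups
--     runs = []
--     i = 0
--     while i < len(s):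
--         j = i + 1
--         while j < len(s) and s[j] == s[i]:
--             j += 1
--         runs.append(j - i)
--         i = j
--     reps = [r for r in runs if r > 1]
--     return runs[-1] <= max_ and min(reps, default=1) >= min_
-- ===== Notes on version B (the rewrite author's own statement) =====
-- stated objective: alternative
-- what changed: A tracks ascending-ness with a previous-digit sentinel loop and builds a character-count dict whose values/max-key it scans; B instead checks sorted(s) == s and run-length encodes the consecutive digit groups, so the dict disappears (last run = count of the largest digit, smallest run >1 = min repeat).
import Mathlib
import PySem

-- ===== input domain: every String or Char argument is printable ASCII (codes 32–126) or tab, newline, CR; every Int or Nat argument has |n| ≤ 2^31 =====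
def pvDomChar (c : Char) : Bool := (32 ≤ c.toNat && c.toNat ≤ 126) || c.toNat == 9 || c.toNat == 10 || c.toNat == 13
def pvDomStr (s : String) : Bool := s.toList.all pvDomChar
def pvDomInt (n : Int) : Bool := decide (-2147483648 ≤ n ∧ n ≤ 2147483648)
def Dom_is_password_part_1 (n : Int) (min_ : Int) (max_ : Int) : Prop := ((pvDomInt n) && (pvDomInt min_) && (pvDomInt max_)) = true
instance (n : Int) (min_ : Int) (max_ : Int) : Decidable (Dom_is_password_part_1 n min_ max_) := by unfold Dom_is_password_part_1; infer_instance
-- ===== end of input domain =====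

-- B replaces A's sentinel-tracking ascent loop and character-count dict by a sorted(s)==s check
-- plus run-length encoding of the digit groups (objective: alternative; return value only).

-- ===== PORT A =====
-- one step of A's loop over str(n); state = (digit, is_asc, repeat, hashmap)
def pvStepA (st : Char × Bool × Int × PySem.Dict Char Int) (c : Char) :
    Char × Bool × Int × PySem.Dict Char Int :=
  let hm := if st.2.2.2.contains c then st.2.2.2.insert c (st.2.2.2.getD c 0 + 1)
            else st.2.2.2.insert c 1
  if st.1 ≤ c then
    if st.1 = c then (c, st.2.1, st.2.2.1 + 1, hm)
    else (c, st.2.1, 1, hm)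
  else (c, false, 1, hm)

def get_repeat_info (n : Int) : Bool × PySem.Dict Char Int :=
  let st := (PySem.Int.toChars n).foldl pvStepA ('0', true, 0, PySem.Dict.empty)
  (st.2.1, st.2.2.2)

def is_password_part_1 (n : Int) (min_ : Int) (max_ : Int) : Bool :=
  let r := get_repeat_info n
  let is_asc := r.1
  let hm := r.2
  let filt := hm.values.filter (fun x => decide (1 < x))
  -- min([...] or [1]): the list is nonempty, so the .getD 0 crash-default is never consulted
  let min_repeat := (PySem.List.min? (if filt.isEmpty then [1] else filt) (fun x => x)).getD 0
  -- hashmap[max(hashmap.keys())]: keys of a counter over str(n) are nonempty, KeyError impossible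
  let max_repeat := match PySem.List.max? hm.keys (fun k => k) with
    | some k => hm.getD k 0
    | none => 0
  if is_asc && decide (max_repeat ≤ max_) && decide (min_ ≤ min_repeat) then true else false

-- ===== PORT B =====
-- Source B's index-based while loops, as the obvious structural recursion: length of the
-- leading run (j - i), then recurse on the rest
def pvRunLens : List Char → List Int
  | [] => []
  | c :: cs =>
    ((cs.takeWhile (fun d => d == c)).length + 1 : Int) ::
      pvRunLens (cs.dropWhile (fun d => d == c))
termination_by l => l.length
decreasing_by
  simp only [List.length_cons]
  exact Nat.lt_succ_of_le (List.length_dropWhile_le _ _)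

def is_password_part_1_alt (n : Int) (min_ : Int) (max_ : Int) : Bool :=
  let s := PySem.Int.toChars n
  if n < 0 || !(PySem.List.sorted s (fun c => c) == s) then false
  else
    let runs := pvRunLens s
    let reps := runs.filter (fun r => decide (1 < r))
    decide (PySem.List.pyGetD runs (-1) 0 ≤ max_) &&
      decide (min_ ≤ PySem.List.minD reps (fun x => x) 1)

-- ===== PRECONDITION & SPEC =====
def Spec_is_password_part_1 (n : Int) (min_ : Int) (max_ : Int) (out : Bool) : Prop := out = is_password_part_1_alt n min_ max_
instance (n : Int) (min_ : Int) (max_ : Int) (out : Bool) : Decidable (Spec_is_password_part_1 n min_ max_ out) := by unfold Spec_is_password_part_1; infer_instance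

-- ===== CLAIM (what is proved, stated in full; the proofs are below) =====
def Claim_equal_is_password_part_1 : Prop := ∀ (n : Int) (min_ : Int) (max_ : Int), Dom_is_password_part_1 n min_ max_ → Spec_is_password_part_1 n min_ max_ (is_password_part_1 n min_ max_)

-- ===== LEMMAS AND PROOFS =====

theorem pvStepA_asc (l : List Char) : ∀ (d : Char) (a : Bool) (r : Int)
    (h : PySem.Dict Char Int),
    ((l.foldl pvStepA (d, a, r, h)).2.1 = true) ↔
      (a = true ∧ List.IsChain (· ≤ ·) (d :: l)) := by
  induction l with
  | nil => intro d a r h; simp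
  | cons c cs ih =>
    intro d a r h
    rw [List.foldl_cons, List.isChain_cons_cons]
    by_cases hle : d ≤ c
    · by_cases heq : d = c
      · rw [show pvStepA (d, a, r, h) c = (c, a, r + 1,
          if h.contains c then h.insert c (h.getD c 0 + 1) else h.insert c 1) by
            simp [pvStepA, heq]]
        rw [ih]
        tauto
      · rw [show pvStepA (d, a, r, h) c = (c, a, 1,
          if h.contains c then h.insert c (h.getD c 0 + 1) else h.insert c 1) by
            simp [pvStepA, hle, heq]]
        rw [ih]
        tauto
    · rw [show pvStepA (d, a, r, h) c = (c, false, 1,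
        if h.contains c then h.insert c (h.getD c 0 + 1) else h.insert c 1) by
          simp [pvStepA, hle]]
      rw [ih]
      simp [hle]

theorem pvStepA_dict (l : List Char) : ∀ (st : Char × Bool × Int × PySem.Dict Char Int),
    (l.foldl pvStepA st).2.2.2 =
      l.foldl (fun h c => h.insert c (h.getD c 0 + 1)) st.2.2.2 := by
  induction l with
  | nil => intro st; rfl
  | cons c cs ih =>
    intro st
    rw [List.foldl_cons, List.foldl_cons, ih]
    congr 1
    show (pvStepA st c).2.2.2 = _
    by_cases hc : st.2.2.2.contains c
    · simp only [pvStepA, hc, if_true]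
      split_ifs <;> rfl
    · simp only [pvStepA, hc, Bool.false_eq_true, if_false]
      rw [PySem.Dict.getD_of_not_contains _ _ (by simpa using hc)]
      split_ifs <;> rfl


theorem pvToChars_ne_nil (n : Int) : PySem.Int.toChars n ≠ [] := by
  unfold PySem.Int.toChars
  split
  · simp
  · exact List.ne_nil_of_length_pos Nat.length_toDigits_pos

theorem pvToChars_neg (n : Int) (h : n < 0) :
    PySem.Int.toChars n = '-' :: Nat.toDigits 10 n.natAbs := by
  simp [PySem.Int.toChars, h]

theorem pvToChars_digit (n : Int) (h : 0 ≤ n) :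
    ∀ c ∈ PySem.Int.toChars n, '0' ≤ c := by
  intro c hc
  unfold PySem.Int.toChars at hc
  rw [if_neg (by omega)] at hc
  have := Nat.isDigit_of_mem_toDigits (by norm_num) (by norm_num) hc
  simp [Char.isDigit] at this
  rw [Char.le_def]
  change (48 : UInt32) ≤ _
  exact this.1


theorem pvMax?_getLast (l : List Char) (h : l ≠ []) (hp : List.Pairwise (· < ·) l) :
    PySem.List.max? l (fun x => x) = some (l.getLast h) := by
  obtain ⟨m, hm⟩ : ∃ m, PySem.List.max? l (fun x => x) = some m := by
    cases hmx : PySem.List.max? l (fun x => x) with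
    | none => exact absurd ((PySem.List.max?_eq_none_iff l _).1 hmx) h
    | some m => exact ⟨m, rfl⟩
  rw [hm]
  congr 1
  have hmem := PySem.List.max?_mem hm
  have hmax := PySem.List.max?_isMax hm
  have hlast := List.getLast_mem h
  have h1 : l.getLast h ≤ m := hmax _ hlast
  have h2 : m ≤ l.getLast h := by
    obtain ⟨i, hi, rfl⟩ := List.mem_iff_getElem.1 hmem
    rw [List.getLast_eq_getElem]
    rcases Nat.lt_or_ge i (l.length - 1) with hlt | hge
    · exact le_of_lt (List.pairwise_iff_getElem.1 hp i (l.length - 1) hi (by omega) hlt)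
    · have : i = l.length - 1 := by omega
      subst this; exact le_refl _
  exact le_antisymm h2 h1

-- helper: ofList of (all-c prefix ++ rest without c), with c discarded, is ofList of the rest
theorem pv_ofList_split (c : Char) (t d : List Char)
    (ht : ∀ x ∈ t, x = c) (hd : c ∉ d) :
    (PySem.Set.ofList (t ++ d)).discard c = PySem.Set.ofList d := by
  rw [PySem.Set.ofList_append, PySem.Set.update_eq_append_filter]
  have hfilter : List.filter (fun y => !(PySem.Set.ofList t).contains y) (PySem.Set.ofList d)
      = PySem.Set.ofList d := by
    apply List.filter_eq_self.2
    intro y hy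
    rw [PySem.Set.mem_ofList] at hy
    have hyt : y ∉ PySem.Set.ofList t := by
      rw [PySem.Set.mem_ofList]
      intro hmem
      exact hd (ht y hmem ▸ hy)
    simp only [Bool.not_eq_eq_eq_not, Bool.not_true]
    rw [← Bool.not_eq_true]
    intro hcon
    exact hyt ((PySem.Set.contains_iff _ _).1 hcon)
  rw [hfilter]
  simp only [PySem.Set.discard, List.filter_append]
  have h1 : List.filter (fun y => !(y == c)) (PySem.Set.ofList t) = [] := by
    rw [List.filter_eq_nil_iff]
    intro a ha
    have := ht a ((PySem.Set.mem_ofList _ _).1 ha)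
    simp [this]
  have h2 : List.filter (fun y => !(y == c)) (PySem.Set.ofList d) = PySem.Set.ofList d := by
    apply List.filter_eq_self.2
    intro a ha
    have haa : a ∈ d := (PySem.Set.mem_ofList _ _).1 ha
    have : a ≠ c := fun hac => hd (hac ▸ haa)
    simp [this]
  rw [h1, h2, List.nil_append]

theorem pvRunLens_spec (s : List Char) (hs : List.Pairwise (· ≤ ·) s) :
    pvRunLens s = (PySem.Set.ofList s).map (fun c => (s.count c : Int)) ∧
      List.Pairwise (· < ·) (PySem.Set.ofList s) := by
  induction s using pvRunLens.induct with
  | case1 => simp [pvRunLens]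
  | case2 c cs ih =>
    set t := cs.takeWhile (fun d => d == c) with htdef
    set d := cs.dropWhile (fun d => d == c) with hddef
    have hsplit : t ++ d = cs := List.takeWhile_append_dropWhile
    have hcs : List.Pairwise (· ≤ ·) cs := (List.pairwise_cons.1 hs).2
    have hcall : ∀ x ∈ cs, c ≤ x := (List.pairwise_cons.1 hs).1
    have ht : ∀ x ∈ t, x = c := by
      intro x hx
      have := List.mem_takeWhile_imp hx
      simpa using this.symm
    have hd_pw : List.Pairwise (· ≤ ·) d :=
      hcs.sublist (hddef ▸ List.dropWhile_sublist _)
    have hcd : ∀ x ∈ d, c < x := by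
      intro x hx
      cases hde : d with
      | nil => rw [hde] at hx; simp at hx
      | cons e es =>
        have he_ne : ¬ (e == c) = true := by
          have hdw : List.dropWhile (fun d => d == c) cs = e :: es := by rw [← hddef, hde]
          have := List.head_dropWhile_not (fun d => d == c) (l := cs) (w := by simp [hdw])
          simp only [hdw, List.head_cons] at this
          simp [this]
        have he_mem : e ∈ cs := by
          have : e ∈ d := by rw [hde]; exact List.mem_cons_self
          exact (List.dropWhile_sublist _).mem (hddef ▸ this)
        have hce : c < e := lt_of_le_of_ne (hcall e he_mem) (by simpa using fun h => he_ne (by simp [h.symm]))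
        rw [hde] at hx
        rcases List.mem_cons.1 hx with rfl | hxe
        · exact hce
        · have : e ≤ x := by
            have := List.pairwise_cons.1 (hde ▸ hd_pw)
            exact this.1 x hxe
          exact lt_of_lt_of_le hce this
    have hc_not_d : c ∉ d := fun h => lt_irrefl c (hcd c h)
    have hofl : PySem.Set.ofList (c :: cs) = c :: PySem.Set.ofList d := by
      rw [PySem.Set.ofList_cons, ← hsplit, pv_ofList_split c t d ht hc_not_d]
    have hcount_c : (c :: cs).count c = t.length + 1 := by
      have h1 : List.count c t = t.length :=
        List.count_eq_length.2 (fun b hb => (ht b hb).symm)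
      have h2 : List.count c d = 0 := List.count_eq_zero.2 hc_not_d
      rw [← hsplit]
      simp [List.count_append, h1, h2]
    have hcount_oth : ∀ k ∈ PySem.Set.ofList d, (c :: cs).count k = d.count k := by
      intro k hk
      have hkd : k ∈ d := (PySem.Set.mem_ofList _ _).1 hk
      have hkc : k ≠ c := fun h => lt_irrefl c (h ▸ hcd k hkd)
      rw [← hsplit]
      simp [List.count_cons, List.count_append,
        List.count_eq_zero.2 (fun hkt => hkc (ht k hkt))]
      exact fun h => hkc h.symm
    obtain ⟨ih1, ih2⟩ := ih hd_pw
    constructor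
    · rw [pvRunLens, hofl, List.map_cons, ih1]
      congr 1
      · rw [← htdef]
        push_cast [hcount_c]
        ring
      · exact (List.map_congr_left (fun k hk => by rw [hcount_oth k hk])).symm
    · rw [hofl]
      exact List.pairwise_cons.2 ⟨fun k hk => hcd k ((PySem.Set.mem_ofList _ _).1 hk), ih2⟩


-- ===== VERDICT (by name: the statement is the Claim_ definition above) =====
-- bundled facts about A's hashmap over s
theorem pv_hm_facts (s : List Char) :
    (s.foldl (fun h c => h.insert c (h.getD c 0 + 1)) (PySem.Dict.empty : PySem.Dict Char Int)).keys = PySem.Set.ofList s ∧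
    (∀ k, (s.foldl (fun h c => h.insert c (h.getD c 0 + 1)) (PySem.Dict.empty : PySem.Dict Char Int)).getD k 0 = (s.count k : Int)) := by
  constructor
  · rw [PySem.Dict.keys_foldl_insert s (fun d x => d.getD x 0 + 1) PySem.Dict.empty]
    simp [PySem.Dict.keys_empty, PySem.Set.update_nil_left]
  · intro k
    rw [PySem.Dict.getD_foldl_insert_add_one]
    simp [PySem.Dict.getD_empty]

theorem is_password_part_1_spec : Claim_equal_is_password_part_1 := by
  intro n min_ max_ _hdom
  unfold Spec_is_password_part_1
  set s := PySem.Int.toChars n with hsdef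
  have hs_ne : s ≠ [] := pvToChars_ne_nil n
  have hasc_iff : (((s.foldl pvStepA ('0', true, 0, PySem.Dict.empty)).2.1) = true) ↔
      List.IsChain (· ≤ ·) ('0' :: s) := by
    rw [pvStepA_asc]; simp
  have hdict : (s.foldl pvStepA ('0', true, 0, PySem.Dict.empty)).2.2.2 =
      s.foldl (fun h c => h.insert c (h.getD c 0 + 1)) PySem.Dict.empty :=
    pvStepA_dict s _
  obtain ⟨hkeys, hGetD⟩ := pv_hm_facts s
  by_cases hA : List.IsChain (· ≤ ·) ('0' :: s)
  · -- ascending case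
    have hPW : List.Pairwise (· ≤ ·) ('0' :: s) := List.isChain_iff_pairwise.1 hA
    have h0le : ∀ x ∈ s, '0' ≤ x := (List.pairwise_cons.1 hPW).1
    have hPs : List.Pairwise (· ≤ ·) s := (List.pairwise_cons.1 hPW).2
    have hn : ¬ n < 0 := by
      intro hneg
      have hcons := pvToChars_neg n hneg
      have : '0' ≤ '-' := h0le '-' (by rw [hsdef, hcons]; exact List.mem_cons_self)
      exact absurd this (by decide)
    have hsorted : PySem.List.sorted s (fun c => c) = s :=
      PySem.List.sorted_eq_self_of_pairwise s _ hPs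
    obtain ⟨hrun, hpwlt⟩ := pvRunLens_spec s hPs
    have hofl_ne : PySem.Set.ofList s ≠ [] := by
      cases hcase : s with
      | nil => exact absurd hcase hs_ne
      | cons c cs => rw [PySem.Set.ofList_cons]; simp
    have hruns_ne : pvRunLens s ≠ [] := by
      rw [hrun]; simpa using hofl_ne
    -- A reduces
    have hmaxq := pvMax?_getLast (PySem.Set.ofList s) hofl_ne hpwlt
    have hascT : (s.foldl pvStepA ('0', true, 0, PySem.Dict.empty)).2.1 = true :=
      hasc_iff.2 hA
    have hnodup : ((s.foldl (fun h c => h.insert c (h.getD c 0 + 1)) PySem.Dict.empty :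
        PySem.Dict Char Int)).keys.Nodup := by
      rw [hkeys]; exact PySem.Set.nodup_ofList s
    have hvalues : (s.foldl (fun h c => h.insert c (h.getD c 0 + 1)) PySem.Dict.empty).values =
        (PySem.Set.ofList s).map (fun k => (s.count k : Int)) := by
      have h := PySem.Dict.values_eq_map_keys _ hnodup (0 : Int)
      rw [hkeys] at h
      rw [h]
      exact List.map_congr_left (fun k _ => hGetD k)
    have hE1 : PySem.List.pyGetD (pvRunLens s) (-1) 0 =
        (s.count ((PySem.Set.ofList s).getLast hofl_ne) : Int) := by
      rw [PySem.List.pyGetD_neg_one _ _ hruns_ne]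
      have h1 : (pvRunLens s).getLast? = some ((pvRunLens s).getLast hruns_ne) :=
        List.getLast?_eq_some_getLast hruns_ne
      have h2 : (PySem.Set.ofList s).getLast? = some ((PySem.Set.ofList s).getLast hofl_ne) :=
        List.getLast?_eq_some_getLast hofl_ne
      have h3 := List.getLast?_map (f := fun c => (s.count c : Int)) (l := PySem.Set.ofList s)
      rw [← hrun, h1, h2] at h3
      simpa using h3
    have hE2 : (PySem.List.min? (if ((pvRunLens s).filter (fun r => decide (1 < r))).isEmpty
          then [1] else (pvRunLens s).filter (fun r => decide (1 < r))) (fun x => x)).getD 0 =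
        PySem.List.minD ((pvRunLens s).filter (fun r => decide (1 < r))) (fun x => x) 1 := by
      simp only [PySem.List.minD]
      by_cases hreps : (pvRunLens s).filter (fun r => decide (1 < r)) = []
      · rw [hreps]; decide
      · rw [if_neg (by simpa [List.isEmpty_iff] using hreps)]
        obtain ⟨m, hm⟩ : ∃ m, PySem.List.min? ((pvRunLens s).filter (fun r => decide (1 < r))) (fun x => x) = some m := by
          cases hmx : PySem.List.min? ((pvRunLens s).filter (fun r => decide (1 < r))) (fun x => x) with
          | none => exact absurd ((PySem.List.min?_eq_none_iff _ _).1 hmx) hreps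
          | some m => exact ⟨m, rfl⟩
        rw [hm]; rfl
    have hB_eq : is_password_part_1_alt n min_ max_ =
        (decide (PySem.List.pyGetD (pvRunLens s) (-1) 0 ≤ max_) &&
         decide (min_ ≤ PySem.List.minD ((pvRunLens s).filter (fun r => decide (1 < r))) (fun x => x) 1)) := by
      unfold is_password_part_1_alt
      rw [← hsdef]
      simp [hn, hsorted]
    unfold is_password_part_1 get_repeat_info
    rw [← hsdef]
    simp only [hdict, hkeys, hmaxq, hGetD, hvalues, ← hrun, hascT, hB_eq, ← hE1, hE2]
    simp
  · -- not ascending: both false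
    have hA_false : is_password_part_1 n min_ max_ = false := by
      unfold is_password_part_1 get_repeat_info
      rw [← hsdef]
      have : (s.foldl pvStepA ('0', true, 0, PySem.Dict.empty)).2.1 = false := by
        rw [← Bool.not_eq_true, hasc_iff]; exact hA
      simp [this]
    rw [hA_false]
    have hguard : (decide (n < 0) || !(PySem.List.sorted s (fun c => c) == s)) = true := by
      by_cases hneg : n < 0
      · simp [hneg]
      · have h0 : ∀ c ∈ s, '0' ≤ c := pvToChars_digit n (by omega)
        have hnps : ¬ List.Pairwise (· ≤ ·) s := by
          intro hps
          exact hA (List.isChain_iff_pairwise.2 (List.pairwise_cons.2 ⟨h0, hps⟩))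
        have : PySem.List.sorted s (fun c => c) ≠ s := by
          intro heq
          have := PySem.List.sorted_pairwise s (fun c => c)
          rw [heq] at this
          exact hnps this
        simp [this]
    unfold is_password_part_1_alt
    rw [← hsdef, if_pos hguard]
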